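-- pv_equiv track=rewrite | github.com/emilasplund/Gruprog | sprakmeny.py | rovarsprak
-- ===== SOURCE A (Python) =====
-- def rovarsprak(inrad):
--     utrad = ""
--     for tkn in inrad:
--         if konsonantcheck(tkn) is True:
--             utrad += tkn + "o" + tkn
--         else:
--             utrad += tkn
--     return utrad
--
-- def konsonantcheck(tkn):
--     konsonantlista = "qwrtpsdfghjklzxcvbnmQWRTPSDFGHJKLZXCVBNM"
--     a = 0
--     for x in konsonantlista:
--         if tkn == x:
--             a = 1
--     if a == 1:
--         return True
--     else:
--         return False
-- ===== SOURCE B (Python) =====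
-- KONSONANTER = "qwrtpsdfghjklzxcvbnmQWRTPSDFGHJKLZXCVBNM"
--
--
-- def rovarsprak(inrad):
--     # Staged whole-string passes: one str.replace per consonant.
--     # Correct because each pass inserts only 'o' (never a consonant that a
--     # later pass handles) and str.replace never rescans its own insertions.
--     for k in KONSONANTER:
--         inrad = inrad.replace(k, k + "o" + k)
--     return inrad
-- ===== Notes on version B (the rewrite author's own statement) =====
-- stated objective: faster
-- what changed: Replaces A's per-character loop with an inner 40-element membership scan by 40 staged whole-string str.replace passes, one per consonant (safe since each pass only inserts 'o' and never rescans its own insertions).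
import Mathlib
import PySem

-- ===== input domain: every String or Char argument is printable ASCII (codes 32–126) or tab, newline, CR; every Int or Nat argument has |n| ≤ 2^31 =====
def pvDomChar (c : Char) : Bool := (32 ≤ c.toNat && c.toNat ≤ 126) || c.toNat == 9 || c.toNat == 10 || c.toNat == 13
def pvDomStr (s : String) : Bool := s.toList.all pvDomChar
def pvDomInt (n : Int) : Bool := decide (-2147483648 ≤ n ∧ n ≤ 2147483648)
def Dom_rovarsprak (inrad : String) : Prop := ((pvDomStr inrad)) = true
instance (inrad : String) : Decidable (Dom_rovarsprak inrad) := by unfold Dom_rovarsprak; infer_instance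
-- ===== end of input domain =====

-- B replaces A's per-character loop (with its inner 40-element consonant scan) by 40 staged
-- whole-string replace passes, one per consonant; objective: faster (constant factor).

-- ===== PORT A =====
def konsonantcheck (tkn : Char) : Bool :=
  let konsonantlista := "qwrtpsdfghjklzxcvbnmQWRTPSDFGHJKLZXCVBNM".toList
  let a : Int := konsonantlista.foldl (fun a x => if tkn == x then 1 else a) 0
  if a == 1 then true else false

def rovarsprak (inrad : String) : String :=
  String.ofList (inrad.toList.foldl
    (fun utrad tkn =>
      if konsonantcheck tkn = true then utrad ++ [tkn, 'o', tkn]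
      else utrad ++ [tkn]) [])

-- ===== PORT B =====
-- for k in KONSONANTER: inrad = inrad.replace(k, k + "o" + k)
def rovarsprak_alt (inrad : String) : String :=
  "qwrtpsdfghjklzxcvbnmQWRTPSDFGHJKLZXCVBNM".toList.foldl
    (fun s k => PySem.Str.replace s (String.ofList [k]) (String.ofList [k, 'o', k])) inrad

-- ===== PRECONDITION & SPEC =====
def Spec_rovarsprak (inrad : String) (out : String) : Prop := out = rovarsprak_alt inrad
instance (inrad : String) (out : String) : Decidable (Spec_rovarsprak inrad out) := by unfold Spec_rovarsprak; infer_instance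

-- ===== CLAIM (what is proved, stated in full; the proofs are below) =====
def Claim_equal_rovarsprak : Prop := ∀ (inrad : String), Dom_rovarsprak inrad → Spec_rovarsprak inrad (rovarsprak inrad)

-- ===== LEMMAS AND PROOFS =====

lemma foldl_flag (tkn : Char) : ∀ (l : List Char) (a : Int),
    l.foldl (fun a x => if tkn == x then 1 else a) a = if tkn ∈ l then 1 else a := by
  intro l
  induction l with
  | nil => intro a; simp
  | cons x xs ih =>
    intro a
    simp only [List.foldl_cons, ih, List.mem_cons]
    by_cases h : tkn = x <;> by_cases h2 : tkn ∈ xs <;> simp [h, h2]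

lemma konsonantcheck_iff (tkn : Char) :
    konsonantcheck tkn = true ↔ tkn ∈ "qwrtpsdfghjklzxcvbnmQWRTPSDFGHJKLZXCVBNM".toList := by
  unfold konsonantcheck
  simp only [foldl_flag]
  split <;> simp_all

-- replace with a single-character pattern substitutes each matching character independently
lemma replace_go_single (a : Char) (new : List Char) : ∀ (fuel : Nat) (l acc : List Char),
    l.length ≤ fuel →
    PySem.Chars.replace.go [a] new fuel l acc
      = acc.reverse ++ l.flatMap (fun c => if c = a then new else [c]) := by
  intro fuel
  induction fuel with
  | zero =>
    intro l acc h
    have : l = [] := List.eq_nil_of_length_eq_zero (Nat.le_zero.mp h)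
    subst this
    simp [PySem.Chars.replace.go]
  | succ n ih =>
    intro l acc h
    cases l with
    | nil => simp [PySem.Chars.replace.go]
    | cons c t =>
      simp only [PySem.Chars.replace.go]
      by_cases hc : c = a
      · subst hc
        have hpre : List.isPrefixOf [c] (c :: t) = true := by
          simp [List.isPrefixOf]
        rw [if_pos hpre]
        simp only [List.length_cons, Nat.add_le_add_iff_right] at h
        rw [ih _ _ (by simpa using h)]
        simp
      · have hpre : List.isPrefixOf [a] (c :: t) = false := by
          simp [List.isPrefixOf, Ne.symm hc]
        rw [if_neg (by simp [hpre])]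
        simp only [List.length_cons, Nat.add_le_add_iff_right] at h
        rw [ih _ _ h]
        simp [hc]

lemma replace_single (a : Char) (new l : List Char) :
    PySem.Chars.replace l [a] new = l.flatMap (fun c => if c = a then new else [c]) := by
  unfold PySem.Chars.replace
  rw [if_neg (by simp)]
  simpa using replace_go_single a new l.length l [] le_rfl

-- the staged replace fold expands every consonant of ks, provided ks has no duplicates and
-- never contains 'o' (so later passes never touch inserted text)
lemma staged_fold (ks : List Char) (hnd : ks.Nodup) (ho : 'o' ∉ ks) : ∀ (l : List Char),
    ks.foldl (fun s k => PySem.Chars.replace s [k] [k, 'o', k]) l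
      = l.flatMap (fun c => if c ∈ ks then [c, 'o', c] else [c]) := by
  induction ks with
  | nil => intro l; simp
  | cons k rest ih =>
    intro l
    have hk : k ∉ rest := (List.nodup_cons.mp hnd).1
    have hnd' : rest.Nodup := (List.nodup_cons.mp hnd).2
    have ho' : 'o' ∉ rest := fun h => ho (List.mem_cons_of_mem _ h)
    rw [List.foldl_cons, replace_single, ih hnd' ho', List.flatMap_assoc]
    apply List.flatMap_congr
    intro c _
    by_cases hc : c = k
    · subst hc
      simp [hk, ho']
    · simp [hc]

-- the fold over Strings is the fold over their character lists
lemma string_fold (ks : List Char) : ∀ (s : String),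
    (ks.foldl (fun s k => PySem.Str.replace s (String.ofList [k]) (String.ofList [k, 'o', k])) s).toList
      = ks.foldl (fun l k => PySem.Chars.replace l [k] [k, 'o', k]) s.toList := by
  induction ks with
  | nil => intro s; simp
  | cons k rest ih =>
    intro s
    rw [List.foldl_cons, List.foldl_cons, ih]
    congr 1
    simp [PySem.Str.replace, String.toList_ofList]

-- ===== VERDICT (by name: the statement is the Claim_ definition above) =====
theorem rovarsprak_spec : Claim_equal_rovarsprak := by
  intro inrad _
  unfold Spec_rovarsprak rovarsprak rovarsprak_alt
  apply String.ext
  rw [string_fold]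
  rw [staged_fold _ (by decide) (by decide)]
  simp only [String.toList_ofList]
  have hfun : (fun (utrad : List Char) (tkn : Char) =>
      if konsonantcheck tkn = true then utrad ++ [tkn, 'o', tkn] else utrad ++ [tkn])
      = fun utrad tkn => utrad ++ (if konsonantcheck tkn = true then [tkn, 'o', tkn] else [tkn]) := by
    funext utrad tkn; split <;> rfl
  rw [hfun, PySem.List.foldl_append_eq_flatMap]
  simp only [List.nil_append]
  apply List.flatMap_congr
  intro c _
  by_cases h : c ∈ "qwrtpsdfghjklzxcvbnmQWRTPSDFGHJKLZXCVBNM".toList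
  · rw [if_pos ((konsonantcheck_iff c).mpr h), if_pos h]
  · rw [if_neg (fun hc => h ((konsonantcheck_iff c).mp hc)), if_neg h]
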